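-- pv_equiv track=rewrite | github.com/MegaGiciorPortas/WDI-Zadania | 02-tablice_jednowymiarowe/2.86.py | szukanie_najdluzszego_podciagu
-- ===== SOURCE A (Python) =====
-- def szukanie_najdluzszego_podciagu(T):
--     najdluzszy_podciag = 0
--     dlugosc = 2
--
--     for i in range(2, len(T)):
--         krotka1 = T[i - 2]
--         krotka2 = T[i - 1]
--         krotka3 = T[i]
--
--         a, b = krotka1[0], krotka1[1]
--         c, d = krotka2[0], krotka2[1]
--         e, f = krotka3[0], krotka3[1]
--
--         if c * c * b * f == d * d * e * a:
--             dlugosc += 1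
--         else:
--             if dlugosc > najdluzszy_podciag:
--                 najdluzszy_podciag = dlugosc
--             dlugosc = 2
--
--     if dlugosc > najdluzszy_podciag:
--         najdluzszy_podciag = dlugosc
--
--     if najdluzszy_podciag <= 2:
--         return 0
--     return najdluzszy_podciag
-- ===== SOURCE B (Python) =====
-- def szukanie_najdluzszego_podciagu(T):
--     n = len(T)
--     # record the positions where the triple condition breaks, with sentinels 1 and n;
--     # the longest valid subsequence corresponds to the largest gap between consecutive breaks
--     breaks = [1]
--     for i in range(2, n):
--         a, b = T[i - 2]
--         c, d = T[i - 1]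
--         e, f = T[i]
--         if c * c * b * f != d * d * e * a:
--             breaks.append(i)
--     breaks.append(n)
--     longest = max(r - l - 1 for l, r in zip(breaks, breaks[1:]))
--     return longest + 2 if longest > 0 else 0
-- ===== Notes on version B (the rewrite author's own statement) =====
-- stated objective: alternative
-- what changed: B replaces A's stateful run-length pass by a break-position method: it collects the indices where the triple condition fails (with sentinels 1 and n) and takes the largest gap between consecutive break positions via zip, returning gap+2 (or 0).
import Mathlib
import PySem

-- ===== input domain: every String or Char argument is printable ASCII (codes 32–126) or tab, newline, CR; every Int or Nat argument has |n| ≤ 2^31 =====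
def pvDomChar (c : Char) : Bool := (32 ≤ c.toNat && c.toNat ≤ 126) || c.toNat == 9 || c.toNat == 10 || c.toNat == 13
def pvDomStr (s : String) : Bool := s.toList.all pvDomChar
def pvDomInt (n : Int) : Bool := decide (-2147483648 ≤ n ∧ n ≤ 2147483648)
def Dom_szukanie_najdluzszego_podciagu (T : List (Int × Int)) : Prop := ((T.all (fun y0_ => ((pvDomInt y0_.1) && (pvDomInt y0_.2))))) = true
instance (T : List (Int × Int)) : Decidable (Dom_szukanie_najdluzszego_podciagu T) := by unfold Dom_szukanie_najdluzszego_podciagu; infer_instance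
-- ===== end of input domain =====

-- B replaces A's stateful run-length pass by collecting the break positions (indices where the
-- triple condition fails, with sentinels 1 and n) and taking the largest gap between consecutive
-- breaks; same O(n), alternative algorithm.

-- ===== PORT A =====
def szukanie_najdluzszego_podciagu (T : List (Int × Int)) : Int :=
  let p := (PySem.List.pyRange 2 (T.length : Int) 1).foldl (fun (s : Int × Int) i =>
      let krotka1 := (PySem.List.pyGet? T (i - 2)).getD (0, 0)
      let krotka2 := (PySem.List.pyGet? T (i - 1)).getD (0, 0)
      let krotka3 := (PySem.List.pyGet? T i).getD (0, 0)
      let a := krotka1.1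
      let b := krotka1.2
      let c := krotka2.1
      let d := krotka2.2
      let e := krotka3.1
      let f := krotka3.2
      if c * c * b * f == d * d * e * a then (s.1, s.2 + 1)
      else (if s.2 > s.1 then s.2 else s.1, 2))
    ((0 : Int), (2 : Int))
  let najdluzszy := if p.2 > p.1 then p.2 else p.1
  if najdluzszy ≤ 2 then (0 : Int) else najdluzszy

-- ===== PORT B =====
def szukanie_najdluzszego_podciagu_alt (T : List (Int × Int)) : Int :=
  let n : Int := (T.length : Int)
  let breaks := [(1 : Int)] ++ (PySem.List.pyRange 2 n 1).filter (fun i =>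
      let ab := (PySem.List.pyGet? T (i - 2)).getD (0, 0)
      let cd := (PySem.List.pyGet? T (i - 1)).getD (0, 0)
      let ef := (PySem.List.pyGet? T i).getD (0, 0)
      !(cd.1 * cd.1 * ab.2 * ef.2 == cd.2 * cd.2 * ef.1 * ab.1)) ++ [n]
  let gaps := (breaks.zip breaks.tail).map (fun p => p.2 - p.1 - 1)
  -- max over the (always nonempty) gaps list
  let longest := match gaps with | [] => (0 : Int) | g :: gs => gs.foldl max g
  if longest > 0 then longest + 2 else 0

-- ===== PRECONDITION & SPEC =====
def Spec_szukanie_najdluzszego_podciagu (T : List (Int × Int)) (out : Int) : Prop := out = szukanie_najdluzszego_podciagu_alt T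
instance (T : List (Int × Int)) (out : Int) : Decidable (Spec_szukanie_najdluzszego_podciagu T out) := by unfold Spec_szukanie_najdluzszego_podciagu; infer_instance

-- ===== CLAIM (what is proved, stated in full; the proofs are below) =====
def Claim_equal_szukanie_najdluzszego_podciagu : Prop := ∀ (T : List (Int × Int)), Dom_szukanie_najdluzszego_podciagu T → Spec_szukanie_najdluzszego_podciagu T (szukanie_najdluzszego_podciagu T)

-- ===== LEMMAS AND PROOFS =====

-- largest gap between consecutive break positions prev :: xs ++ [e]
def pvMaxgap (prev : Int) (xs : List Int) (e : Int) : Int :=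
  match xs with
  | [] => e - prev - 1
  | x :: xs => max (x - prev - 1) (pvMaxgap x xs e)

-- A's fold, starting at position a with last break lb, computes max naj (pvMaxgap lb breaks b + 2)
theorem pv_bridgeA (P : Int → Bool) : ∀ (k : Nat) (a b naj lb : Int), (b - a).toNat = k →
    lb + 1 ≤ a → a ≤ b →
    max ((PySem.List.pyRange a b 1).foldl (fun (s : Int × Int) i =>
        if P i then (s.1, s.2 + 1) else (if s.2 > s.1 then s.2 else s.1, 2)) (naj, a - lb + 1)).1
      ((PySem.List.pyRange a b 1).foldl (fun (s : Int × Int) i =>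
        if P i then (s.1, s.2 + 1) else (if s.2 > s.1 then s.2 else s.1, 2)) (naj, a - lb + 1)).2
    = max naj (pvMaxgap lb ((PySem.List.pyRange a b 1).filter (fun i => !P i)) b + 2) := by
  intro k
  induction k with
  | zero =>
    intro a b naj lb hk h1 h2
    have hab : a = b := by omega
    rw [PySem.List.pyRange_one_eq_nil (by omega)]
    simp only [List.foldl_nil, List.filter_nil, pvMaxgap]
    subst hab
    simp only [max_def]
    split_ifs <;> omega
  | succ k ih =>
    intro a b naj lb hk h1 h2
    have hab : a < b := by omega
    rw [PySem.List.pyRange_one_cons hab]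
    simp only [List.foldl_cons, List.filter_cons]
    cases h : P a with
    | true =>
      simp only [Bool.not_true, Bool.false_eq_true, if_false, if_true]
      have := ih (a + 1) b naj lb (by omega) (by omega) (by omega)
      rw [show (a + 1) - lb + 1 = a - lb + 1 + 1 by ring] at this
      exact this
    | false =>
      simp only [Bool.false_eq_true, if_false, Bool.not_false, if_true]
      have := ih (a + 1) b (if a - lb + 1 > naj then a - lb + 1 else naj) a (by omega) (by omega) (by omega)
      rw [show (a + 1) - a + 1 = (2 : Int) by ring] at this
      rw [this]
      simp only [pvMaxgap]
      generalize pvMaxgap a ((PySem.List.pyRange (a + 1) b 1).filter (fun i => !P i)) b = L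
      simp only [max_def]
      split_ifs <;> omega

-- the zip-based max over gaps equals pvMaxgap
theorem pv_zipmax : ∀ (xs : List Int) (prev e : Int),
    (match (((prev :: (xs ++ [e])).zip (xs ++ [e])).map (fun p => p.2 - p.1 - 1)) with
      | [] => (0 : Int) | g :: gs => gs.foldl max g)
    = pvMaxgap prev xs e := by
  intro xs
  induction xs with
  | nil => intro prev e; simp [pvMaxgap]
  | cons x xs ih =>
    intro prev e
    simp only [List.cons_append, List.zip_cons_cons, List.map_cons, pvMaxgap]
    rw [← ih x e]
    cases hxs : xs ++ [e] with
    | nil => exact absurd hxs (by simp)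
    | cons y ys =>
      simp only [List.zip_cons_cons, List.map_cons, List.foldl_cons]
      rw [List.foldl_assoc]

-- ===== VERDICT (by name: the statement is the Claim_ definition above) =====
theorem szukanie_najdluzszego_podciagu_spec : Claim_equal_szukanie_najdluzszego_podciagu := by
  intro T _
  unfold Spec_szukanie_najdluzszego_podciagu szukanie_najdluzszego_podciagu szukanie_najdluzszego_podciagu_alt
  set P : Int → Bool := fun i =>
      ((PySem.List.pyGet? T (i - 1)).getD (0, 0)).1 * ((PySem.List.pyGet? T (i - 1)).getD (0, 0)).1
        * ((PySem.List.pyGet? T (i - 2)).getD (0, 0)).2 * ((PySem.List.pyGet? T i).getD (0, 0)).2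
      == ((PySem.List.pyGet? T (i - 1)).getD (0, 0)).2 * ((PySem.List.pyGet? T (i - 1)).getD (0, 0)).2
        * ((PySem.List.pyGet? T i).getD (0, 0)).1 * ((PySem.List.pyGet? T (i - 2)).getD (0, 0)).1 with hP
  show (let p := (PySem.List.pyRange 2 (T.length : Int) 1).foldl (fun (s : Int × Int) i =>
        if P i then (s.1, s.2 + 1) else (if s.2 > s.1 then s.2 else s.1, 2)) ((0 : Int), (2 : Int));
      let najdluzszy := if p.2 > p.1 then p.2 else p.1
      if najdluzszy ≤ 2 then (0 : Int) else najdluzszy)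
    = (let n : Int := (T.length : Int)
      let breaks := [(1 : Int)] ++ (PySem.List.pyRange 2 n 1).filter (fun i => !P i) ++ [n]
      let gaps := (breaks.zip breaks.tail).map (fun p => p.2 - p.1 - 1)
      let longest := match gaps with | [] => (0 : Int) | g :: gs => gs.foldl max g
      if longest > 0 then longest + 2 else 0)
  simp only [List.cons_append, List.nil_append, List.tail_cons]
  by_cases hn : (3 : Int) ≤ (T.length : Int)
  · have hA := pv_bridgeA P ((T.length : Int) - 2).toNat 2 (T.length : Int) 0 1 rfl (by omega) (by omega)
    rw [show (2 : Int) - 1 + 1 = 2 by ring] at hA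
    have hB := pv_zipmax ((PySem.List.pyRange 2 (T.length : Int) 1).filter (fun i => !P i)) 1 (T.length : Int)
    simp only [hB]
    revert hA
    simp only [max_def]
    generalize (PySem.List.pyRange 2 (T.length : Int) 1).foldl (fun (s : Int × Int) i =>
        if P i then (s.1, s.2 + 1) else (if s.2 > s.1 then s.2 else s.1, 2)) ((0 : Int), (2 : Int)) = p
    generalize pvMaxgap 1 ((PySem.List.pyRange 2 (T.length : Int) 1).filter (fun i => !P i)) (T.length : Int) = L
    intro hA
    split_ifs at hA ⊢ <;> omega
  · have h0 : PySem.List.pyRange 2 (T.length : Int) 1 = [] :=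
      PySem.List.pyRange_one_eq_nil (by omega)
    simp only [h0, List.foldl_nil, List.filter_nil, List.nil_append,
      List.zip_cons_cons, List.zip_nil_right, List.map_cons, List.map_nil, List.foldl_nil]
    have h1 : ¬ ((T.length : Int) - 1 - 1 > 0) := by omega
    simp only [h1, if_false]
    norm_num
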